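-- pv_equiv track=rewrite | github.com/shenyi828/openclaw-bear-notes | scripts/render_note.py | strip_duplicate_h1_and_tags
-- ===== SOURCE A (Python) =====
-- from typing import List, Optional
--
-- def normalize_tag(tag: str) -> str:
--     tag = tag.strip()
--     if not tag:
--         return ""
--     return tag if tag.startswith("#") else f"#{tag}"
--
-- def strip_duplicate_h1_and_tags(title: str, body: str, tags: List[str]) -> str:
--     lines = body.splitlines()
--     clean_tag_set = {normalize_tag(t) for t in tags if t.strip()}
--
--     i = 0
--     while i < len(lines) and not lines[i].strip():
--         i += 1
--     if i < len(lines):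
--         first = lines[i].strip().lstrip('#').strip()
--         if first == title.strip():
--             lines = lines[:i] + lines[i+1:]
--
--     cleaned = []
--     for line in lines:
--         s = line.strip()
--         if s in clean_tag_set:
--             continue
--         cleaned.append(line)
--
--     while cleaned and not cleaned[0].strip():
--         cleaned = cleaned[1:]
--     return "\n".join(cleaned).strip()
-- ===== SOURCE B (Python) =====
-- from typing import List
--
-- def normalize_tag(tag: str) -> str:
--     tag = tag.strip()
--     if not tag:
--         return ""
--     return tag if tag.startswith("#") else f"#{tag}"
--
-- def strip_duplicate_h1_and_tags(title: str, body: str, tags: List[str]) -> str: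
--     # One pass over the lines: a boolean marks whether the first non-blank
--     # line has been examined for the duplicate-H1 test; the explicit
--     # leading-blank trim is unnecessary because the final strip() covers it.
--     tag_set = {normalize_tag(t) for t in tags if t.strip()}
--     want = title.strip()
--     out = []
--     seen = False
--     for line in body.splitlines():
--         s = line.strip()
--         if not seen and s:
--             seen = True
--             if s.lstrip('#').strip() == want:
--                 continue
--         if s in tag_set:
--             continue
--         out.append(line)
--     return "\n".join(out).strip()
-- ===== Notes on version B (the rewrite author's own statement) =====
-- stated objective: simpler
-- what changed: A's three separate passes (whitespace-scan + slice to drop the duplicate H1, a tag-filter pass, a leading-blank trim loop) are merged into one traversal with a 'first non-blank line seen' flag, relying on the final strip() to absorb leading blanks.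
import Mathlib
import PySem

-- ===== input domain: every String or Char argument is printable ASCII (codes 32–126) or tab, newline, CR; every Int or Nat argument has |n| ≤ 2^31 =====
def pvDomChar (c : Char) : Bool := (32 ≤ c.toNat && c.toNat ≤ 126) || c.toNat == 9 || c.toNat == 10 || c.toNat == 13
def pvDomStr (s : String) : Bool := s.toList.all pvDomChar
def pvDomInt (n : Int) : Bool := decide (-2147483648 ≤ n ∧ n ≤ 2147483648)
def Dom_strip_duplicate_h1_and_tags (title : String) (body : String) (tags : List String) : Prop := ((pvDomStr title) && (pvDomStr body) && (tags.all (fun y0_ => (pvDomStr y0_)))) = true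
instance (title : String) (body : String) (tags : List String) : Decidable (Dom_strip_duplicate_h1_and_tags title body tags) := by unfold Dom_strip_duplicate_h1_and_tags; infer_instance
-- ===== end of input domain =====

-- B merges A's three passes (H1 scan, tag filter, leading-blank trim) into one
-- traversal with a 'first non-blank line seen' flag; the final strip() makes the
-- explicit leading-blank trim unnecessary.  Objective: simpler (one pass).

-- ===== PORT A =====
-- normalize_tag (module helper, used by both Pythons)
def pvNormalizeTag (tag : String) : String :=
  if PySem.Str.strip tag = "" then ""
  else if PySem.Str.startswith (PySem.Str.strip tag) "#" then PySem.Str.strip tag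
  else "#" ++ PySem.Str.strip tag

-- hand port of str.lstrip('#') (PySem has no lstrip-with-chars): exact — drops leading '#' characters
def pvLStripHash (s : String) : String :=
  String.ofList (s.toList.dropWhile (fun c => c == '#'))

-- {normalize_tag(t) for t in tags if t.strip()} (used by both Pythons)
def pvTagSet (tags : List String) : PySem.Set String :=
  PySem.Set.ofList ((tags.filter (fun t => PySem.Str.strip t ≠ "")).map pvNormalizeTag)

-- the 'i = 0; while i < len(lines) and not lines[i].strip(): i += 1' loop
def pvCountBlanks : List String → Nat
  | [] => 0
  | l :: rest => if PySem.Str.strip l = "" then pvCountBlanks rest + 1 else 0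

-- the 'while cleaned and not cleaned[0].strip(): cleaned = cleaned[1:]' loop
def pvDropBlanks : List String → List String
  | [] => []
  | l :: rest => if PySem.Str.strip l = "" then pvDropBlanks rest else l :: rest

-- the 'if i < len(lines): … lines = lines[:i] + lines[i+1:]' block
def pvRemoveH1 (title : String) (lines : List String) : List String :=
  let i := pvCountBlanks lines
  if i < lines.length then
    if PySem.Str.strip (pvLStripHash (PySem.Str.strip ((PySem.List.pyGet? lines (i : Int)).getD ""))) = PySem.Str.strip title then
      PySem.List.slice lines none (some (i : Int)) ++ PySem.List.slice lines (some ((i : Int) + 1)) none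
    else lines
  else lines

def strip_duplicate_h1_and_tags (title : String) (body : String) (tags : List String) : String :=
  PySem.Str.strip (PySem.Str.join "\n" (pvDropBlanks
    ((pvRemoveH1 title (PySem.Str.splitlines body)).foldl
      (fun acc line => if (pvTagSet tags).contains (PySem.Str.strip line) then acc else acc ++ [line]) [])))

-- ===== PORT B =====
-- B's single loop: seen = 'first non-blank line already examined'
def pvOnePass (w : String) (cts : PySem.Set String) : Bool → List String → List String
  | _, [] => []
  | seen, l :: rest =>
    let s := PySem.Str.strip l
    if !seen && !(s == "") then
      if PySem.Str.strip (pvLStripHash s) = w then pvOnePass w cts true rest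
      else if cts.contains s then pvOnePass w cts true rest
      else l :: pvOnePass w cts true rest
    else if cts.contains s then pvOnePass w cts seen rest
    else l :: pvOnePass w cts seen rest

def strip_duplicate_h1_and_tags_alt (title : String) (body : String) (tags : List String) : String :=
  PySem.Str.strip (PySem.Str.join "\n"
    (pvOnePass (PySem.Str.strip title) (pvTagSet tags) false (PySem.Str.splitlines body)))

-- ===== PRECONDITION & SPEC =====
def Spec_strip_duplicate_h1_and_tags (title : String) (body : String) (tags : List String) (out : String) : Prop := out = strip_duplicate_h1_and_tags_alt title body tags
instance (title : String) (body : String) (tags : List String) (out : String) : Decidable (Spec_strip_duplicate_h1_and_tags title body tags out) := by unfold Spec_strip_duplicate_h1_and_tags; infer_instance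

-- ===== CLAIM (what is proved, stated in full; the proofs are below) =====
def Claim_equal_strip_duplicate_h1_and_tags : Prop := ∀ (title : String) (body : String) (tags : List String), Dom_strip_duplicate_h1_and_tags title body tags → Spec_strip_duplicate_h1_and_tags title body tags (strip_duplicate_h1_and_tags title body tags)

-- ===== LEMMAS AND PROOFS =====

-- the tag set never contains the empty string (so blank lines survive the tag filter)
theorem pvTagSet_not_contains_empty (tags : List String) :
    (pvTagSet tags).contains "" = false := by
  rw [Bool.eq_false_iff]
  intro h
  have hmem : ("" : String) ∈ pvTagSet tags := List.contains_iff_mem.mp h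
  unfold pvTagSet at hmem
  rw [PySem.Set.mem_ofList] at hmem
  obtain ⟨t, ht, heq⟩ := List.mem_map.mp hmem
  have hne : PySem.Str.strip t ≠ "" := by
    have := (List.mem_filter.mp ht).2
    simpa using this
  unfold pvNormalizeTag at heq
  rw [if_neg hne] at heq
  by_cases hs : PySem.Str.startswith (PySem.Str.strip t) "#" = true
  · rw [if_pos hs] at heq; exact hne heq
  · rw [if_neg hs] at heq
    have := congrArg String.toList heq
    simp [String.toList_append] at this

-- strip l == "" (Python 'not line.strip()') means every char of l is whitespace
theorem blank_all_isspace (l : String) (h : PySem.Str.strip l = "") :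
    ∀ c ∈ l.toList, PySem.Chars.isspace c = true := by
  have h1 : PySem.Chars.rstrip (PySem.Chars.lstrip l.toList) = [] := by
    have := congrArg String.toList h
    simpa [PySem.Str.toList_strip, PySem.Chars.strip] using this
  have h2 : ∀ c ∈ List.dropWhile PySem.Chars.isspace l.toList, PySem.Chars.isspace c = true := by
    intro c hc
    unfold PySem.Chars.rstrip PySem.Chars.lstrip at h1
    have h3 := List.reverse_eq_nil_iff.mp h1
    exact List.dropWhile_eq_nil_iff.mp h3 c (List.mem_reverse.mpr hc)
  intro c hc
  rw [← List.takeWhile_append_dropWhile (p := PySem.Chars.isspace) (l := l.toList)] at hc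
  rcases List.mem_append.mp hc with hc | hc
  · exact List.mem_takeWhile_imp hc
  · exact h2 c hc

-- strip of a list with an all-whitespace prefix ignores the prefix
theorem strip_append_of_allspace (ws cs : List Char) (h : ∀ c ∈ ws, PySem.Chars.isspace c = true) :
    PySem.Chars.strip (ws ++ cs) = PySem.Chars.strip cs := by
  unfold PySem.Chars.strip PySem.Chars.lstrip
  rw [List.dropWhile_append, List.dropWhile_eq_nil_iff.mpr h]
  simp

-- a blank first line does not change '\n'.join(…).strip()
theorem strip_join_cons_blank (l : String) (ls : List String) (h : PySem.Str.strip l = "") :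
    PySem.Str.strip (PySem.Str.join "\n" (l :: ls)) = PySem.Str.strip (PySem.Str.join "\n" ls) := by
  apply String.toList_inj.mp
  simp only [PySem.Str.toList_strip, PySem.Str.toList_join, List.map_cons]
  cases ls with
  | nil =>
    simp only [List.map_nil]
    rw [PySem.Chars.join_singleton, PySem.Chars.join_nil]
    have := congrArg String.toList h
    simpa [PySem.Str.toList_strip] using this
  | cons x xs =>
    simp only [List.map_cons]
    rw [PySem.Chars.join_cons_cons]
    have hall : ∀ c ∈ l.toList ++ "\n".toList, PySem.Chars.isspace c = true := by
      intro c hc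
      rcases List.mem_append.mp hc with hc | hc
      · exact blank_all_isspace l h c hc
      · simp at hc; subst hc; decide
    exact strip_append_of_allspace _ _ hall

-- dropping leading blank lines before join-and-strip is a no-op
theorem strip_join_dropBlanks (ls : List String) :
    PySem.Str.strip (PySem.Str.join "\n" (pvDropBlanks ls)) = PySem.Str.strip (PySem.Str.join "\n" ls) := by
  induction ls with
  | nil => rfl
  | cons l rest ih =>
    unfold pvDropBlanks
    by_cases h : PySem.Str.strip l = ""
    · rw [if_pos h, ih, strip_join_cons_blank l rest h]
    · rw [if_neg h]

-- Bool/Prop bridges for Set.contains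
theorem pv_mem_of_contains {cts : PySem.Set String} {s : String}
    (h : cts.contains s = true) : s ∈ cts := List.contains_iff_mem.mp h
theorem pv_not_mem_of_contains {cts : PySem.Set String} {s : String}
    (h : cts.contains s = false) : s ∉ cts :=
  fun hm => by
    have hx : cts.contains s = true := List.contains_iff_mem.mpr hm
    rw [h] at hx
    exact Bool.false_ne_true hx

-- unfolding equation for pvOnePass on a cons cell
theorem onePass_cons (w : String) (cts : PySem.Set String) (seen : Bool) (l : String) (rest : List String) :
    pvOnePass w cts seen (l :: rest)
      = (if !seen && !(PySem.Str.strip l == "") then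
           if PySem.Str.strip (pvLStripHash (PySem.Str.strip l)) = w then pvOnePass w cts true rest
           else if cts.contains (PySem.Str.strip l) then pvOnePass w cts true rest
           else l :: pvOnePass w cts true rest
         else if cts.contains (PySem.Str.strip l) then pvOnePass w cts seen rest
         else l :: pvOnePass w cts seen rest) := rfl

-- A's cleaning foldl is a filter
theorem foldl_clean (cts : PySem.Set String) (ls : List String) (acc : List String) :
    ls.foldl (fun acc line => if cts.contains (PySem.Str.strip line) then acc else acc ++ [line]) acc
      = acc ++ ls.filter (fun l => !cts.contains (PySem.Str.strip l)) := by
  induction ls generalizing acc with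
  | nil => simp
  | cons l rest ih =>
    simp only [List.foldl_cons, List.filter_cons]
    by_cases h : cts.contains (PySem.Str.strip l) = true
    · rw [if_pos h, ih]; simp [pv_mem_of_contains h]
    · rw [if_neg h, ih]
      have h' : cts.contains (PySem.Str.strip l) = false := Bool.eq_false_iff.mpr h
      simp [pv_not_mem_of_contains h']

-- after the first non-blank line B is the same filter
theorem onePass_true (w : String) (cts : PySem.Set String) (ls : List String) :
    pvOnePass w cts true ls = ls.filter (fun l => !cts.contains (PySem.Str.strip l)) := by
  induction ls with
  | nil => rfl
  | cons l rest ih =>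
    rw [onePass_cons, List.filter_cons]
    have hfalse : (!true && !(PySem.Str.strip l == "")) = false := by simp
    rw [hfalse, if_neg Bool.false_ne_true]
    by_cases h : cts.contains (PySem.Str.strip l) = true
    · rw [if_pos h, ih]; simp [pv_mem_of_contains h]
    · rw [if_neg h, ih]
      have h' : cts.contains (PySem.Str.strip l) = false := Bool.eq_false_iff.mpr h
      simp [pv_not_mem_of_contains h']

-- the core list equality: A's H1-removal followed by the tag filter is B's single pass
theorem core_eq (title : String) (cts : PySem.Set String) (hc : cts.contains "" = false) :
    ∀ lines : List String,
      (pvRemoveH1 title lines).filter (fun l => !cts.contains (PySem.Str.strip l))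
        = pvOnePass (PySem.Str.strip title) cts false lines := by
  intro lines
  induction lines with
  | nil => rfl
  | cons l rest ih =>
    by_cases hb : PySem.Str.strip l = ""
    · -- blank first line: both sides keep l and recurse
      have hA : pvRemoveH1 title (l :: rest) = l :: pvRemoveH1 title rest := by
        unfold pvRemoveH1
        simp only [pvCountBlanks, if_pos hb]
        by_cases hlen : pvCountBlanks rest < rest.length
        · rw [if_pos (by simpa using Nat.succ_lt_succ hlen), if_pos hlen]
          have hget : (PySem.List.pyGet? (l :: rest) ((pvCountBlanks rest + 1 : Nat) : Int)).getD ""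
              = (PySem.List.pyGet? rest ((pvCountBlanks rest : Nat) : Int)).getD "" := by
            rw [PySem.List.pyGet?_natCast, PySem.List.pyGet?_natCast]
            simp
          rw [hget]
          by_cases hfw : PySem.Str.strip (pvLStripHash (PySem.Str.strip ((PySem.List.pyGet? rest ((pvCountBlanks rest : Nat) : Int)).getD ""))) = PySem.Str.strip title
          · rw [if_pos hfw, if_pos hfw]
            rw [PySem.List.slice_to _ (by positivity), PySem.List.slice_to _ (by positivity),
                PySem.List.slice_from _ (by positivity), PySem.List.slice_from _ (by positivity)]
            have e1 : ((pvCountBlanks rest + 1 : Nat) : Int).toNat = pvCountBlanks rest + 1 := by simp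
            have e2 : (((pvCountBlanks rest + 1 : Nat) : Int) + 1).toNat = pvCountBlanks rest + 2 := by omega
            have e3 : ((pvCountBlanks rest : Nat) : Int).toNat = pvCountBlanks rest := by simp
            have e4 : (((pvCountBlanks rest : Nat) : Int) + 1).toNat = pvCountBlanks rest + 1 := by omega
            rw [e1, e2, e3, e4]
            simp [List.take_succ_cons, List.drop_succ_cons]
          · rw [if_neg hfw, if_neg hfw]
        · rw [if_neg (by simpa using fun h => hlen (Nat.lt_of_succ_lt_succ h)), if_neg hlen]
      rw [hA, List.filter_cons]
      have hcl : cts.contains (PySem.Str.strip l) = false := by rw [hb]; exact hc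
      rw [ih]
      have hBs : pvOnePass (PySem.Str.strip title) cts false (l :: rest)
          = l :: pvOnePass (PySem.Str.strip title) cts false rest := by
        rw [onePass_cons]
        have hbeq : (PySem.Str.strip l == "") = true := by rw [hb]; rfl
        simp [hbeq, pv_not_mem_of_contains hcl]
      rw [hBs]
      simp [pv_not_mem_of_contains hcl]
    · -- first non-blank line: H1 test fires here on both sides
      have hi : pvCountBlanks (l :: rest) = 0 := by simp [pvCountBlanks, hb]
      have hA : pvRemoveH1 title (l :: rest)
          = if PySem.Str.strip (pvLStripHash (PySem.Str.strip l)) = PySem.Str.strip title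
            then rest else l :: rest := by
        unfold pvRemoveH1
        rw [hi]
        rw [if_pos (by simp)]
        have hget : (PySem.List.pyGet? (l :: rest) ((0 : Nat) : Int)).getD "" = l := by
          rw [PySem.List.pyGet?_natCast]; rfl
        have h0 : ((0 : Nat) : Int) = (0 : Int) := rfl
        rw [hget]
        by_cases hfw : PySem.Str.strip (pvLStripHash (PySem.Str.strip l)) = PySem.Str.strip title
        · rw [if_pos hfw, if_pos hfw]
          rw [PySem.List.slice_to _ (by norm_num), PySem.List.slice_from _ (by norm_num)]
          norm_num
        · rw [if_neg hfw, if_neg hfw]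
      have hbeq : (PySem.Str.strip l == "") = false := by
        simp [hb]
      have hB : pvOnePass (PySem.Str.strip title) cts false (l :: rest)
          = if PySem.Str.strip (pvLStripHash (PySem.Str.strip l)) = PySem.Str.strip title
            then pvOnePass (PySem.Str.strip title) cts true rest
            else if cts.contains (PySem.Str.strip l) then pvOnePass (PySem.Str.strip title) cts true rest
            else l :: pvOnePass (PySem.Str.strip title) cts true rest := by
        rw [onePass_cons]
        simp [hbeq]
      rw [hA, hB]
      by_cases hfw : PySem.Str.strip (pvLStripHash (PySem.Str.strip l)) = PySem.Str.strip title
      · rw [if_pos hfw, if_pos hfw, onePass_true]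
      · rw [if_neg hfw, if_neg hfw, List.filter_cons, onePass_true]
        by_cases h : cts.contains (PySem.Str.strip l) = true
        · simp [pv_mem_of_contains h]
        · have h' : cts.contains (PySem.Str.strip l) = false := Bool.eq_false_iff.mpr h
          simp [pv_not_mem_of_contains h']

-- ===== VERDICT (by name: the statement is the Claim_ definition above) =====
theorem strip_duplicate_h1_and_tags_spec : Claim_equal_strip_duplicate_h1_and_tags := by
  intro title body tags _
  unfold Spec_strip_duplicate_h1_and_tags strip_duplicate_h1_and_tags strip_duplicate_h1_and_tags_alt
  rw [foldl_clean, List.nil_append, strip_join_dropBlanks,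
      core_eq title (pvTagSet tags) (pvTagSet_not_contains_empty tags)]
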